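-- pv_equiv track=rewrite | github.com/jkpark104/js-codingTest | 2. 구현/자물쇠와 열쇠.py | solution
-- ===== SOURCE A (Python) =====
-- def rotate(data):
--     n = len(data)
--     m = len(data[0])
--     array = [[0] * n for _ in range(m)]
--     for i in range(n):
--         for j in range(m):
--             array[j][i] = data[n - 1 - i][j]
--     return array
--
-- def solution(key, lock):
--   n = len(key)
--   m = len(lock)
--   hole = [[i,j] for i in range(m) for j in range(m) if lock[i][j] == 0]
--   if (not len(hole)): return True
--
--   for _ in range(4):
--     key = rotate(key)
--     home = [[i,j] for i in range(n) for j in range(n) if key[i][j]]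
--
--     for x, y in hole:
--       for i, j in home:
--         dx = -i + x
--         dy = -j + y
--
--         match = 0
--         cnt = 0
--         arrangedHome = [[i+dx,j+dy] for i, j in home]
--         for ax, ay in arrangedHome:
--           if (0<=ax<m and 0<=ay<m):
--             if (lock[ax][ay] == 0):
--               cnt += 1
--               match += 1
--           else:
--             cnt += 1
--         if match == len(hole) and cnt == len(home):
--           return True
--   return False
-- ===== SOURCE B (Python) =====
-- def _fits(cells, holes, m, dx, dy):
--     for (i, j) in cells:
--         x, y = i + dx, j + dy
--         if 0 <= x < m and 0 <= y < m and (x, y) not in holes: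
--             return False
--     for (x, y) in holes:
--         if (x - dx, y - dy) not in cells:
--             return False
--     return True
--
-- def solution(key, lock):
--     m = len(lock)
--     holes = {(i, j) for i in range(m) for j in range(m) if lock[i][j] == 0}
--     if not holes:
--         return True
--     # a fitting offset must align some protrusion onto the first hole,
--     # so only those |cells| offsets need testing
--     x0, y0 = next((i, j) for i in range(m) for j in range(m) if lock[i][j] == 0)
--     n = len(key)
--     cells = {(i, j) for i, row in enumerate(key) for j, v in enumerate(row) if v}
--     for _ in range(4):
--         cells = {(j, n - 1 - i) for (i, j) in cells}
--         if any(_fits(cells, holes, m, x0 - i, y0 - j) for (i, j) in cells):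
--             return True
--     return False
-- ===== Notes on version B (the rewrite author's own statement) =====
-- stated objective: faster
-- what changed: B precomputes the hole set and the key's protrusion set once, rotates by mapping coordinates instead of rebuilding matrices, and tests only the offsets that align some protrusion onto the first hole, each with O(1) set lookups, instead of A's loop over every hole x protrusion pair that recounts matches over all protrusions for each pair; …
-- outside the precondition, e.g. on solution([[1, 1]], [[1, 0], [1, 0]]): A returns False, B returns True
import Mathlib
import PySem

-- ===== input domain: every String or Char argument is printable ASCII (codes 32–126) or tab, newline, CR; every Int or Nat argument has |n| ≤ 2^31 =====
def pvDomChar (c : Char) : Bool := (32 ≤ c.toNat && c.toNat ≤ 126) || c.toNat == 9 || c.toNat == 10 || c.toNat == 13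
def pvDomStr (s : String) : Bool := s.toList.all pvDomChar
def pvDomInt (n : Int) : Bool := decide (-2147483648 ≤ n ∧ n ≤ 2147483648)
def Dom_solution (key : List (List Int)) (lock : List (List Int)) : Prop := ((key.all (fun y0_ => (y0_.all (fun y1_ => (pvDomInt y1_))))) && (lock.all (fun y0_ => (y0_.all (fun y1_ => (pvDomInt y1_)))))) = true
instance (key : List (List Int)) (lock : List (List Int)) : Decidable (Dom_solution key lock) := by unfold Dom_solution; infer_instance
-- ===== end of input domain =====

-- B precomputes hole/protrusion sets, rotates by mapping coordinates instead of rebuilding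
-- matrices, and tests only the offsets aligning some protrusion onto the first hole with O(1)
-- set lookups, instead of A's hole×protrusion double scan with a full recount per pair.

-- ===== PORT A =====

-- rotate(data): array[j][i] = data[n-1-i][j] via in-place assignments; all indices here are
-- non-negative Python ints in range under Pre_, so Nat getD/set/modify are exact.
-- data[0] on empty data raises IndexError in Python; Pre_ guarantees key ≠ [] whenever A calls rotate.
def pyA_rotate (data : List (List Int)) : List (List Int) :=
  let n := data.length
  let m := (data.headD []).length
  let array := List.replicate m (List.replicate n (0 : Int))
  (List.range n).foldl (fun arr i =>
    (List.range m).foldl (fun arr j =>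
      arr.modify j (fun row => row.set i ((data.getD (n - 1 - i) []).getD j 0))) arr) array

-- hole = [[i,j] for i in range(m) for j in range(m) if lock[i][j] == 0]  (pairs for [i,j])
def pyA_holes (lock : List (List Int)) : List (Int × Int) :=
  (List.range lock.length).flatMap (fun i =>
    (List.range lock.length).filterMap (fun j =>
      if (lock.getD i []).getD j 0 = 0 then some ((i : Int), (j : Int)) else none))

-- home = [[i,j] for i in range(n) for j in range(n) if key[i][j]]
def pyA_home (k : List (List Int)) (n : Nat) : List (Int × Int) :=
  (List.range n).flatMap (fun i =>
    (List.range n).filterMap (fun j =>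
      if (k.getD i []).getD j 0 ≠ 0 then some ((i : Int), (j : Int)) else none))

-- the body of the 'for x, y in hole: for i, j in home:' loops (match/cnt counting)
def pyA_check (lock : List (List Int)) (hole home : List (Int × Int)) (m x y i j : Int) : Bool :=
  let dx := -i + x
  let dy := -j + y
  let arrangedHome := home.map (fun c => (c.1 + dx, c.2 + dy))
  let mc := arrangedHome.foldl (fun (mc : Int × Int) a =>
      if 0 ≤ a.1 ∧ a.1 < m ∧ 0 ≤ a.2 ∧ a.2 < m then
        (if PySem.List.pyGetD (PySem.List.pyGetD lock a.1 []) a.2 0 = 0 then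
          (mc.1 + 1, mc.2 + 1) else (mc.1, mc.2))
      else (mc.1, mc.2 + 1)) ((0 : Int), (0 : Int))
  decide (mc.1 = (hole.length : Int)) && decide (mc.2 = (home.length : Int))

-- 'for _ in range(4): key = rotate(key); home = …; for…for…: return True; … return False'
def pyA_loop (lock : List (List Int)) (hole : List (Int × Int)) (n m : Nat) :
    List (List Int) → Nat → Bool
  | _, 0 => false
  | key, r + 1 =>
    let key' := pyA_rotate key
    let home := pyA_home key' n
    if hole.any (fun h => home.any (fun c =>
        pyA_check lock hole home (m : Int) h.1 h.2 c.1 c.2)) then true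
    else pyA_loop lock hole n m key' r

def solution (key : List (List Int)) (lock : List (List Int)) : Bool :=
  let n := key.length
  let m := lock.length
  let hole := pyA_holes lock
  if hole.length = 0 then true
  else pyA_loop lock hole n m key 4

-- ===== PORT B =====

-- _fits: every shifted protrusion inside the board must land on a hole, every hole must be covered
def pyB_fits (cells holes : PySem.Set (Int × Int)) (m dx dy : Int) : Bool :=
  (cells.all (fun c =>
      !(decide (0 ≤ c.1 + dx ∧ c.1 + dx < m ∧ 0 ≤ c.2 + dy ∧ c.2 + dy < m) &&
        !(PySem.Set.contains holes (c.1 + dx, c.2 + dy))))) &&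
  (holes.all (fun h => PySem.Set.contains cells (h.1 - dx, h.2 - dy)))

-- holes = {(i,j) for i in range(m) for j in range(m) if lock[i][j] == 0}; the same scan,
-- read again by next(...), yields the first hole (the scan is guarded by 'if not holes')
def pyB_holeScan (lock : List (List Int)) : List (Int × Int) :=
  (List.range lock.length).flatMap (fun i =>
    (List.range lock.length).filterMap (fun j =>
      if (lock.getD i []).getD j 0 = 0 then some ((i : Int), (j : Int)) else none))

def pyB_holes (lock : List (List Int)) : PySem.Set (Int × Int) :=
  PySem.Set.ofList (pyB_holeScan lock)

-- cells = {(i,j) for i,row in enumerate(key) for j,v in enumerate(row) if v}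
def pyB_cells (key : List (List Int)) : PySem.Set (Int × Int) :=
  PySem.Set.ofList ((PySem.List.enumerate key 0).flatMap (fun ir =>
    (PySem.List.enumerate ir.2 0).filterMap (fun jv =>
      if jv.2 ≠ 0 then some (ir.1, jv.1) else none)))

-- 'for _ in range(4): cells = {(j, n-1-i) …}; if any(_fits(cells, holes, m, x0-i, y0-j)
--  for (i, j) in cells): return True' — any over a set is order-independent
def pyB_loop (holes : PySem.Set (Int × Int)) (x0 y0 n m : Int) :
    PySem.Set (Int × Int) → Nat → Bool
  | _, 0 => false
  | cells, r + 1 =>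
    let cells' := PySem.Set.ofList (cells.map (fun c => (c.2, n - 1 - c.1)))
    if cells'.any (fun c => pyB_fits cells' holes m (x0 - c.1) (y0 - c.2)) then true
    else pyB_loop holes x0 y0 n m cells' r

def solution_alt (key : List (List Int)) (lock : List (List Int)) : Bool :=
  let m := lock.length
  let holes := pyB_holes lock
  if holes.isEmpty then true
  else
    -- x0, y0 = next(...): guarded by the emptiness test, so the default is never exposed
    let h0 := (pyB_holeScan lock).headD (0, 0)
    pyB_loop holes h0.1 h0.2 (key.length : Int) (m : Int) (pyB_cells key) 4

-- ===== PRECONDITION & SPEC =====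
-- Pre_ excludes locks with a row shorter than the lock (A's hole scan raises IndexError) and,
-- when the lock has a hole, empty or non-square keys — outside the puzzle's stated domain —
-- on which A's rotate either raises or reads key cells through a fixed n×n window that does
-- not correspond to any rotation of the key.
def Pre_solution (key : List (List Int)) (lock : List (List Int)) : Prop :=
  (∀ row ∈ lock, lock.length ≤ row.length) ∧
  ((∀ i < lock.length, ∀ j < lock.length, (lock.getD i []).getD j 0 ≠ 0) ∨
   (key ≠ [] ∧ ∀ row ∈ key, row.length = key.length))
instance (key : List (List Int)) (lock : List (List Int)) : Decidable (Pre_solution key lock) := by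
  unfold Pre_solution; infer_instance

def pvWitness_solution : List (List Int) × List (List Int) := ([[1, 0], [0, 0]], [[1, 0], [1, 1]])

def Spec_solution (key : List (List Int)) (lock : List (List Int)) (out : Bool) : Prop := out = solution_alt key lock
instance (key : List (List Int)) (lock : List (List Int)) (out : Bool) : Decidable (Spec_solution key lock out) := by unfold Spec_solution; infer_instance

-- ===== CLAIM (what is proved, stated in full; the proofs are below) =====
def Claim_equal_solution : Prop := ∀ (key : List (List Int)) (lock : List (List Int)), Dom_solution key lock → Pre_solution key lock → Spec_solution key lock (solution key lock)

-- ===== LEMMAS AND PROOFS =====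

lemma mem_grid (n m : Nat) (p : Nat → Nat → Prop) [inst : ∀ i j, Decidable (p i j)]
    (q : Int × Int) :
    q ∈ (List.range n).flatMap (fun i => (List.range m).filterMap (fun j =>
        if p i j then some ((i : Int), (j : Int)) else none)) ↔
      ∃ i j : Nat, i < n ∧ j < m ∧ q = ((i : Int), (j : Int)) ∧ p i j := by
  simp only [List.mem_flatMap, List.mem_range, List.mem_filterMap]
  constructor
  · rintro ⟨i, hi, j, hj, h⟩
    by_cases hp : p i j
    · simp only [hp, if_true, Option.some.injEq] at h
      exact ⟨i, j, hi, hj, h.symm, hp⟩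
    · simp [hp] at h
  · rintro ⟨i, j, hi, hj, rfl, hp⟩
    exact ⟨i, hi, j, hj, by simp [hp]⟩

lemma nodup_grid (n m : Nat) (p : Nat → Nat → Prop) [inst : ∀ i j, Decidable (p i j)] :
    ((List.range n).flatMap (fun i => (List.range m).filterMap (fun j =>
        if p i j then some ((i : Int), (j : Int)) else none))).Nodup := by
  rw [List.nodup_flatMap]
  have hfst : ∀ (i : Nat) (b : Int × Int),
      b ∈ (List.range m).filterMap (fun j => if p i j then some ((i : Int), (j : Int)) else none) →
      b.1 = (i : Int) := by
    intro i b hb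
    rcases List.mem_filterMap.1 hb with ⟨j, _, hj⟩
    by_cases hp : p i j
    · simp only [hp, if_true, Option.some.injEq] at hj; rw [← hj]
    · simp [hp] at hj
  constructor
  · intro i _
    apply List.Nodup.filterMap ?_ List.nodup_range
    intro a a' b hb hb'
    by_cases hp : p i a
    · simp only [hp, if_true, Option.mem_def, Option.some.injEq] at hb
      by_cases hp' : p i a'
      · simp only [hp', if_true, Option.mem_def, Option.some.injEq] at hb'
        rw [← hb'] at hb
        exact Nat.cast_injective (congrArg Prod.snd hb)
      · simp [hp'] at hb'
    · simp [hp] at hb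
  · refine List.pairwise_lt_range.imp ?_
    intro i i' hlt b hb hb'
    have := hfst i b hb
    have := hfst i' b hb'
    omega

lemma foldl_length_invariant {α β : Type} (f : List α → β → List α)
    (h : ∀ a b, (f a b).length = a.length) (l : List β) :
    ∀ arr : List α, (l.foldl f arr).length = arr.length := by
  induction l with
  | nil => intro arr; rfl
  | cons x xs ih => intro arr; simp only [List.foldl_cons, ih, h]

lemma foldl_modify_getElem? {α : Type} (g : Nat → α → α) (m : Nat) (arr : List α) (k : Nat) :
    ((List.range m).foldl (fun a j => a.modify j (g j)) arr)[k]? =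
      if k < m then (arr[k]?).map (g k) else arr[k]? := by
  induction m with
  | zero => simp
  | succ m ih =>
    rw [List.range_succ, List.foldl_append]
    simp only [List.foldl_cons, List.foldl_nil, List.getElem?_modify, ih]
    rcases Nat.lt_trichotomy k m with h | rfl | h
    · simp [h, Nat.lt_succ_of_lt h, Nat.ne_of_gt h]
    · simp
    · simp only [if_neg (Nat.lt_asymm h), if_neg (by omega : ¬ k < m + 1), Nat.ne_of_lt h]
      simp

def pvEntry (k : List (List Int)) (i j : Nat) : Int := (k.getD i []).getD j 0

lemma rot_core (v : Nat → Nat → Int) (m n : Nat) :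
    ∀ (t : Nat) (k : Nat), k < m →
      ((List.range t).foldl (fun arr i => (List.range m).foldl
          (fun a j => a.modify j (fun row => row.set i (v i j))) arr)
        (List.replicate m (List.replicate n (0 : Int))))[k]? =
      some ((List.range n).map (fun i => if i < t then v i k else 0)) := by
  intro t
  induction t with
  | zero =>
    intro k hk
    simp [hk, List.map_const']
  | succ t ih =>
    intro k hk
    rw [List.range_succ, List.foldl_append, List.foldl_cons, List.foldl_nil]
    rw [foldl_modify_getElem? (g := fun j (row : List Int) => row.set t (v t j)), if_pos hk, ih k hk]
    simp only [Option.map_some]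
    congr 1
    apply List.ext_getElem
    · simp
    · intro i h1 h2
      simp only [List.getElem_set, List.getElem_map, List.getElem_range]
      split_ifs <;> (try subst_vars) <;> first | rfl | omega

lemma rotate_spec (key : List (List Int)) (n : Nat) (hn : key.length = n)
    (hsq : ∀ row ∈ key, row.length = n) (hpos : 0 < n) :
    (pyA_rotate key).length = n ∧ (∀ row ∈ pyA_rotate key, row.length = n) ∧
      ∀ a b : Nat, a < n → b < n → pvEntry (pyA_rotate key) a b = pvEntry key (n - 1 - b) a := by
  have hhead : (key.headD []).length = n := by
    cases key with
    | nil => simp at hn; omega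
    | cons r rest => exact hsq r List.mem_cons_self
  have hrot : pyA_rotate key = (List.range n).foldl (fun arr i => (List.range n).foldl
      (fun a j => a.modify j (fun row => row.set i ((key.getD (n - 1 - i) []).getD j 0))) arr)
      (List.replicate n (List.replicate n (0 : Int))) := by
    simp only [pyA_rotate, hn, hhead]
  have hget : ∀ k : Nat, k < n → (pyA_rotate key)[k]? =
      some ((List.range n).map (fun i => if i < n then (key.getD (n - 1 - i) []).getD k 0 else 0)) := by
    intro k hk
    rw [hrot]
    exact rot_core (fun i j => (key.getD (n - 1 - i) []).getD j 0) n n n k hk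
  have hlen : (pyA_rotate key).length = n := by
    rw [hrot]
    rw [foldl_length_invariant _ (fun a b => foldl_length_invariant _ (fun a' b' => List.length_modify ..) _ a) _ _]
    exact List.length_replicate
  refine ⟨hlen, ?_, ?_⟩
  · intro row hrow
    rcases List.mem_iff_getElem.1 hrow with ⟨k, hk, hrk⟩
    rw [hlen] at hk
    have := hget k hk
    rw [List.getElem?_eq_getElem (by omega), hrk] at this
    have := Option.some.inj this
    rw [this]
    simp
  · intro a b ha hb
    unfold pvEntry
    have h1 : (pyA_rotate key).getD a [] =
        (List.range n).map (fun i => if i < n then (key.getD (n - 1 - i) []).getD a 0 else 0) := by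
      rw [List.getD_eq_getElem?_getD, hget a ha]
      rfl
    rw [h1, List.getD_eq_getElem?_getD]
    rw [List.getElem?_map]
    simp [hb]

def pvIsHole (lock : List (List Int)) (p : Int × Int) : Prop :=
  ∃ i j : Nat, i < lock.length ∧ j < lock.length ∧ p = ((i : Int), (j : Int)) ∧ pvEntry lock i j = 0

abbrev pvInb (m : Int) (p : Int × Int) : Prop := 0 ≤ p.1 ∧ p.1 < m ∧ 0 ≤ p.2 ∧ p.2 < m

abbrev pvHole0 (lock : List (List Int)) (p : Int × Int) : Prop :=
  PySem.List.pyGetD (PySem.List.pyGetD lock p.1 []) p.2 0 = 0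

def pvFitsProp (lock : List (List Int)) (home : List (Int × Int)) (δ : Int × Int) : Prop :=
  (∀ c ∈ home, pvInb lock.length (c.1 + δ.1, c.2 + δ.2) → pvHole0 lock (c.1 + δ.1, c.2 + δ.2)) ∧
  (∀ h ∈ pyA_holes lock, (h.1 - δ.1, h.2 - δ.2) ∈ home)

lemma mem_pyA_holes (lock : List (List Int)) (q : Int × Int) :
    q ∈ pyA_holes lock ↔ pvIsHole lock q :=
  mem_grid lock.length lock.length (fun i j => (lock.getD i []).getD j 0 = 0) q

lemma nodup_pyA_holes (lock : List (List Int)) : (pyA_holes lock).Nodup :=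
  nodup_grid lock.length lock.length (fun i j => (lock.getD i []).getD j 0 = 0)

lemma hole_iff (lock : List (List Int)) (_hrow : ∀ row ∈ lock, lock.length ≤ row.length)
    (q : Int × Int) : pvIsHole lock q ↔ pvInb (lock.length : Int) q ∧ pvHole0 lock q := by
  constructor
  · rintro ⟨i, j, hi, hj, rfl, he⟩
    refine ⟨⟨by simp, by simpa using hi, by simp, by simpa using hj⟩, ?_⟩
    unfold pvHole0
    simp only [PySem.List.pyGetD_natCast]
    exact he
  · rintro ⟨⟨h1, h2, h3, h4⟩, hh⟩
    refine ⟨q.1.toNat, q.2.toNat, by omega, by omega, by simp [h1, h3], ?_⟩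
    unfold pvHole0 at hh
    rw [show q.1 = ((q.1.toNat : Nat) : Int) by omega, show q.2 = ((q.2.toNat : Nat) : Int) by omega]
      at hh
    simp only [PySem.List.pyGetD_natCast] at hh
    exact hh

lemma match_iff (lock : List (List Int)) (hrow : ∀ row ∈ lock, lock.length ≤ row.length)
    (home : List (Int × Int)) (hnd : home.Nodup) (δ : Int × Int) :
    home.countP (fun c => decide (pvInb (lock.length : Int) (c.1 + δ.1, c.2 + δ.2) ∧
        pvHole0 lock (c.1 + δ.1, c.2 + δ.2))) = (pyA_holes lock).length ↔
      ∀ h ∈ pyA_holes lock, (h.1 - δ.1, h.2 - δ.2) ∈ home := by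
  set P : Int × Int → Bool := fun c => decide (pvInb (lock.length : Int) (c.1 + δ.1, c.2 + δ.2) ∧
        pvHole0 lock (c.1 + δ.1, c.2 + δ.2)) with hP
  set L : List (Int × Int) := (home.filter P).map (fun c => (c.1 + δ.1, c.2 + δ.2)) with hL
  have hLnd : L.Nodup := by
    refine (hnd.filter P).map ?_
    intro a b hab
    have h1 := congrArg Prod.fst hab
    have h2 := congrArg Prod.snd hab
    simp only at h1 h2
    exact Prod.ext (by omega) (by omega)
  have hsub : ∀ q ∈ L, q ∈ pyA_holes lock := by
    intro q hq
    rcases List.mem_map.1 hq with ⟨c, hc, rfl⟩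
    have hPc := (List.mem_filter.1 hc).2
    rw [hP] at hPc
    have := of_decide_eq_true hPc
    exact (mem_pyA_holes lock _).2 ((hole_iff lock hrow _).2 this)
  have hlenL : L.length = home.countP P := by
    rw [hL, List.length_map, ← List.countP_eq_length_filter]
  have hcov_of_eq : L.length = (pyA_holes lock).length →
      ∀ h ∈ pyA_holes lock, (h.1 - δ.1, h.2 - δ.2) ∈ home := by
    intro hlen h hh
    have hfs : L.toFinset = (pyA_holes lock).toFinset := by
      apply Finset.eq_of_subset_of_card_le
      · intro q hq
        exact List.mem_toFinset.2 (hsub q (List.mem_toFinset.1 hq))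
      · rw [List.toFinset_card_of_nodup hLnd, List.toFinset_card_of_nodup (nodup_pyA_holes lock),
          hlen]
    have : h ∈ L := List.mem_toFinset.1 (hfs ▸ List.mem_toFinset.2 hh)
    rcases List.mem_map.1 this with ⟨c, hc, hceq⟩
    have hc1 := congrArg Prod.fst hceq
    have hc2 := congrArg Prod.snd hceq
    simp only at hc1 hc2
    have : (h.1 - δ.1, h.2 - δ.2) = c := Prod.ext (by omega) (by omega)
    rw [this]
    exact (List.mem_filter.1 hc).1
  constructor
  · intro heq
    exact hcov_of_eq (by rw [hlenL]; exact heq)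
  · intro hcov
    have hsup : ∀ h ∈ pyA_holes lock, h ∈ L := by
      intro h hh
      have hc : (h.1 - δ.1, h.2 - δ.2) ∈ home := hcov h hh
      have hih := (hole_iff lock hrow h).1 ((mem_pyA_holes lock h).1 hh)
      have hPc : P (h.1 - δ.1, h.2 - δ.2) = true := by
        rw [hP]
        apply decide_eq_true
        simp only [sub_add_cancel]
        exact hih
      refine List.mem_map.2 ⟨(h.1 - δ.1, h.2 - δ.2), List.mem_filter.2 ⟨hc, hPc⟩, ?_⟩
      simp [sub_add_cancel]
    have hfs : L.toFinset = (pyA_holes lock).toFinset := by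
      apply Finset.Subset.antisymm
      · intro q hq; exact List.mem_toFinset.2 (hsub q (List.mem_toFinset.1 hq))
      · intro q hq; exact List.mem_toFinset.2 (hsup q (List.mem_toFinset.1 hq))
    have := congrArg Finset.card hfs
    rw [List.toFinset_card_of_nodup hLnd, List.toFinset_card_of_nodup (nodup_pyA_holes lock)]
      at this
    rw [← hlenL]
    exact this

lemma check_iff (lock : List (List Int)) (hrow : ∀ row ∈ lock, lock.length ≤ row.length)
    (home : List (Int × Int)) (hnd : home.Nodup) (x y i j : Int) :
    (pyA_check lock (pyA_holes lock) home (lock.length : Int) x y i j = true) ↔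
      pvFitsProp lock home (-i + x, -j + y) := by
  unfold pyA_check
  dsimp only
  have hstep : (fun (mc : Int × Int) (a : Int × Int) =>
      if 0 ≤ a.1 ∧ a.1 < (lock.length : Int) ∧ 0 ≤ a.2 ∧ a.2 < (lock.length : Int) then
        (if PySem.List.pyGetD (PySem.List.pyGetD lock a.1 []) a.2 0 = 0 then
          (mc.1 + 1, mc.2 + 1) else (mc.1, mc.2))
      else (mc.1, mc.2 + 1))
      = (fun (mc : Int × Int) (a : Int × Int) =>
        (if pvInb (lock.length : Int) a ∧ pvHole0 lock a then mc.1 + 1 else mc.1,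
         if pvInb (lock.length : Int) a → pvHole0 lock a then mc.2 + 1 else mc.2)) := by
    funext mc a
    split_ifs <;> first | rfl | (exfalso; simp_all [pvInb, pvHole0])
  rw [hstep, PySem.List.foldl_prod_mk
    (f := fun (acc : Int) (a : Int × Int) =>
      if pvInb (lock.length : Int) a ∧ pvHole0 lock a then acc + 1 else acc)
    (g := fun (acc : Int) (a : Int × Int) =>
      if pvInb (lock.length : Int) a → pvHole0 lock a then acc + 1 else acc)]
  rw [PySem.List.foldl_ite_add_one, PySem.List.foldl_ite_add_one]
  simp only [List.countP_map]
  simp only [Bool.and_eq_true, decide_eq_true_iff, zero_add]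
  have hc1 : ∀ k : Nat, ((k : Int) = ((pyA_holes lock).length : Int)) ↔ k = (pyA_holes lock).length := by
    intro k; exact_mod_cast Iff.rfl
  have hc2 : ∀ k : Nat, ((k : Int) = (home.length : Int)) ↔ k = home.length := by
    intro k; exact_mod_cast Iff.rfl
  rw [hc1, hc2]
  unfold pvFitsProp
  rw [and_comm]
  apply and_congr
  · rw [List.countP_eq_length]
    constructor
    · intro h c hc hin
      have := h c hc
      simp only [Function.comp_apply, decide_eq_true_iff] at this
      exact this hin
    · intro h c hc
      simp only [Function.comp_apply, decide_eq_true_iff]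
      exact h c hc
  · rw [← match_iff lock hrow home hnd (-i + x, -j + y)]
    apply Eq.congr_left
    apply List.countP_congr
    intro c _
    simp [Function.comp]

lemma pyB_holeScan_eq (lock : List (List Int)) : pyB_holeScan lock = pyA_holes lock := rfl

lemma pyB_holes_eq (lock : List (List Int)) :
    pyB_holes lock = PySem.Set.ofList (pyA_holes lock) := rfl

lemma mem_pyB_holes (lock : List (List Int)) (q : Int × Int) :
    q ∈ pyB_holes lock ↔ q ∈ pyA_holes lock := by
  rw [pyB_holes_eq]; exact PySem.Set.mem_ofList (xs := pyA_holes lock) (y := q)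

lemma fits_iff (lock : List (List Int)) (hrow : ∀ row ∈ lock, lock.length ≤ row.length)
    (home cells : List (Int × Int)) (hmem : ∀ p : Int × Int, p ∈ cells ↔ p ∈ home)
    (dx dy : Int) :
    (pyB_fits cells (pyB_holes lock) (lock.length : Int) dx dy = true) ↔
      pvFitsProp lock home (dx, dy) := by
  unfold pyB_fits pvFitsProp
  simp only [Bool.and_eq_true, List.all_eq_true, Bool.not_eq_true', Bool.and_eq_false_iff,
    decide_eq_false_iff_not, Bool.not_eq_false', PySem.Set.contains_iff, mem_pyB_holes]
  constructor
  · rintro ⟨h1, h2⟩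
    constructor
    · intro c hc hin
      rcases h1 c ((hmem c).2 hc) with h | h
      · exact absurd hin h
      · exact ((hole_iff lock hrow _).1 ((mem_pyA_holes lock _).1 h)).2
    · intro h hh
      exact (hmem _).1 (h2 h hh)
  · rintro ⟨h1, h2⟩
    constructor
    · intro c hc
      by_cases hin : pvInb (lock.length : Int) (c.1 + dx, c.2 + dy)
      · right
        exact (mem_pyA_holes lock _).2 ((hole_iff lock hrow _).2 ⟨hin, h1 c ((hmem c).1 hc) hin⟩)
      · left; exact hin
    · intro h hh
      exact (hmem _).2 (h2 h hh)

lemma any_iff (lock : List (List Int)) (hrow : ∀ row ∈ lock, lock.length ≤ row.length)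
    (h0 : Int × Int) (hh0 : h0 ∈ pyA_holes lock) (home cells : List (Int × Int))
    (hnd : home.Nodup) (hmem : ∀ p : Int × Int, p ∈ cells ↔ p ∈ home) :
    ((pyA_holes lock).any fun h => home.any fun c =>
        pyA_check lock (pyA_holes lock) home (lock.length : Int) h.1 h.2 c.1 c.2)
      = (cells.any fun c =>
          pyB_fits cells (pyB_holes lock) (lock.length : Int) (h0.1 - c.1) (h0.2 - c.2)) := by
  rw [Bool.eq_iff_iff]
  simp only [List.any_eq_true]
  constructor
  · rintro ⟨h, hh, c, hc, hchk⟩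
    have F := (check_iff lock hrow home hnd h.1 h.2 c.1 c.2).1 hchk
    have hc0 : (h0.1 - (-c.1 + h.1), h0.2 - (-c.2 + h.2)) ∈ home := F.2 h0 hh0
    refine ⟨(h0.1 - (-c.1 + h.1), h0.2 - (-c.2 + h.2)), (hmem _).2 hc0, ?_⟩
    apply (fits_iff lock hrow home cells hmem _ _).2
    have heq : (h0.1 - (h0.1 - (-c.1 + h.1), h0.2 - (-c.2 + h.2)).1,
        h0.2 - (h0.1 - (-c.1 + h.1), h0.2 - (-c.2 + h.2)).2) = (-c.1 + h.1, -c.2 + h.2) := by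
      apply Prod.ext <;> simp
    rw [heq]
    exact F
  · rintro ⟨c, hc, hfit⟩
    have F := (fits_iff lock hrow home cells hmem (h0.1 - c.1) (h0.2 - c.2)).1 hfit
    have hcA : (h0.1 - (h0.1 - c.1), h0.2 - (h0.2 - c.2)) ∈ home := F.2 h0 hh0
    refine ⟨h0, hh0, (h0.1 - (h0.1 - c.1), h0.2 - (h0.2 - c.2)), hcA, ?_⟩
    apply (check_iff lock hrow home hnd h0.1 h0.2 _ _).2
    have heq : (-(h0.1 - (h0.1 - c.1), h0.2 - (h0.2 - c.2)).1 + h0.1,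
        -(h0.1 - (h0.1 - c.1), h0.2 - (h0.2 - c.2)).2 + h0.2) = (h0.1 - c.1, h0.2 - c.2) := by
      apply Prod.ext <;> simp <;> ring
    rw [heq]
    exact F

def pvIsCell (k : List (List Int)) (n : Nat) (p : Int × Int) : Prop :=
  ∃ i j : Nat, i < n ∧ j < n ∧ p = ((i : Int), (j : Int)) ∧ pvEntry k i j ≠ 0

lemma mem_pyA_home (k : List (List Int)) (n : Nat) (q : Int × Int) :
    q ∈ pyA_home k n ↔ pvIsCell k n q :=
  mem_grid n n (fun i j => (k.getD i []).getD j 0 ≠ 0) q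

lemma nodup_pyA_home (k : List (List Int)) (n : Nat) : (pyA_home k n).Nodup :=
  nodup_grid n n (fun i j => (k.getD i []).getD j 0 ≠ 0)

lemma mem_pyB_cells (key : List (List Int)) (n : Nat) (hn : key.length = n)
    (hsq : ∀ row ∈ key, row.length = n) (q : Int × Int) :
    q ∈ pyB_cells key ↔ pvIsCell key n q := by
  unfold pyB_cells pvIsCell
  rw [PySem.Set.mem_ofList]
  simp only [List.mem_flatMap, PySem.List.mem_enumerate_iff, List.mem_filterMap]
  constructor
  · rintro ⟨ir, ⟨a, ha, rfl⟩, jv, ⟨b, hb, rfl⟩, hcond⟩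
    simp only at hb hcond
    split at hcond
    · rename_i hz
      have hq : q = ((a : Int), (b : Int)) := by
        have := Option.some.inj hcond
        rw [← this]
        apply Prod.ext <;> simp
      have hbl : key[a].length = n := hsq key[a] (List.getElem_mem ha)
      refine ⟨a, b, by omega, by omega, hq, ?_⟩
      unfold pvEntry
      rw [show key.getD a [] = key[a] from List.getD_eq_getElem _ _ (by omega),
        List.getD_eq_getElem _ _ (by omega)]
      exact hz
    · exact absurd hcond (by simp)
  · rintro ⟨a, b, ha, hb, rfl, hne⟩
    have ha' : a < key.length := by omega
    have hb' : b < key[a].length := by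
      have := hsq key[a] (List.getElem_mem ha'); omega
    refine ⟨(0 + (a : Int), key[a]), ⟨a, ha', rfl⟩, (0 + (b : Int), key[a][b]), ⟨b, hb', rfl⟩, ?_⟩
    have hz : key[a][b] ≠ 0 := by
      unfold pvEntry at hne
      rw [List.getD_eq_getElem _ _ ha', List.getD_eq_getElem _ _ hb'] at hne
      exact hne
    simp [hz]

lemma cells_rotate (key : List (List Int)) (n : Nat) (hn : key.length = n)
    (hsq : ∀ row ∈ key, row.length = n) (hpos : 0 < n) (cells : List (Int × Int))
    (hmem : ∀ p : Int × Int, p ∈ cells ↔ pvIsCell key n p) :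
    ∀ q : Int × Int, q ∈ PySem.Set.ofList (cells.map (fun c => (c.2, (n : Int) - 1 - c.1))) ↔
      pvIsCell (pyA_rotate key) n q := by
  intro q
  obtain ⟨hlen, hrows, hent⟩ := rotate_spec key n hn hsq hpos
  rw [PySem.Set.mem_ofList, List.mem_map]
  constructor
  · rintro ⟨c, hc, rfl⟩
    rcases (hmem c).1 hc with ⟨a, b, ha, hb, rfl, hne⟩
    refine ⟨b, n - 1 - a, hb, by omega, ?_, ?_⟩
    · apply Prod.ext
      · rfl
      · show (n : Int) - 1 - (a : Int) = ((n - 1 - a : Nat) : Int); omega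
    · rw [hent b (n - 1 - a) hb (by omega), show n - 1 - (n - 1 - a) = a by omega]
      exact hne
  · rintro ⟨a, b, ha, hb, rfl, hne⟩
    rw [hent a b ha hb] at hne
    refine ⟨(((n - 1 - b : Nat) : Int), (a : Int)), ?_, ?_⟩
    · exact (hmem _).2 ⟨n - 1 - b, a, by omega, ha, rfl, hne⟩
    · apply Prod.ext
      · rfl
      · show (n : Int) - 1 - ((n - 1 - b : Nat) : Int) = (b : Int); omega

lemma loop_eq (lock : List (List Int)) (hrow : ∀ row ∈ lock, lock.length ≤ row.length)
    (h0 : Int × Int) (hh0 : h0 ∈ pyA_holes lock) (n : Nat) (hpos : 0 < n) :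
    ∀ (r : Nat) (key : List (List Int)) (cells : List (Int × Int)),
      key.length = n → (∀ row ∈ key, row.length = n) →
      (∀ p : Int × Int, p ∈ cells ↔ pvIsCell key n p) →
      pyA_loop lock (pyA_holes lock) n lock.length key r
        = pyB_loop (pyB_holes lock) h0.1 h0.2 (n : Int) (lock.length : Int) cells r := by
  intro r
  induction r with
  | zero => intros; rfl
  | succ r ih =>
    intro key cells hn hsq hmem
    obtain ⟨hlen', hrows', hent'⟩ := rotate_spec key n hn hsq hpos
    have hmem' : ∀ p : Int × Int,
        p ∈ PySem.Set.ofList (cells.map (fun c => (c.2, (n : Int) - 1 - c.1))) ↔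
          pvIsCell (pyA_rotate key) n p := cells_rotate key n hn hsq hpos cells hmem
    have hmemhome : ∀ p : Int × Int,
        p ∈ PySem.Set.ofList (cells.map (fun c => (c.2, (n : Int) - 1 - c.1))) ↔
          p ∈ pyA_home (pyA_rotate key) n :=
      fun p => (hmem' p).trans (mem_pyA_home (pyA_rotate key) n p).symm
    have hany := any_iff lock hrow h0 hh0 (pyA_home (pyA_rotate key) n)
      (PySem.Set.ofList (cells.map (fun c => (c.2, (n : Int) - 1 - c.1))))
      (nodup_pyA_home (pyA_rotate key) n) hmemhome
    show (if (pyA_holes lock).any _ then true else _) = (if _ then true else _)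
    rw [hany]
    by_cases hcond : ((PySem.Set.ofList (cells.map (fun c => (c.2, (n : Int) - 1 - c.1)))).any
        fun c => pyB_fits (PySem.Set.ofList (cells.map (fun c => (c.2, (n : Int) - 1 - c.1))))
          (pyB_holes lock) (lock.length : Int) (h0.1 - c.1) (h0.2 - c.2)) = true
    · rw [if_pos hcond, if_pos hcond]
    · rw [if_neg hcond, if_neg hcond]
      exact ih (pyA_rotate key) _ hlen' hrows' hmem'

theorem solution_spec : Claim_equal_solution := by
  intro key lock _ hpre
  unfold Spec_solution solution solution_alt
  dsimp only
  obtain ⟨hrow, hcase⟩ := hpre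
  by_cases hhe : pyA_holes lock = []
  · have hB : (pyB_holes lock).isEmpty = true := by
      rw [pyB_holes_eq, hhe]; rfl
    rw [if_pos (by rw [hhe]; rfl), if_pos hB]
  · have hB : (pyB_holes lock).isEmpty = false := by
      rcases List.exists_mem_of_ne_nil _ hhe with ⟨q, hq⟩
      have : q ∈ pyB_holes lock := (mem_pyB_holes lock q).2 hq
      have hne2 : pyB_holes lock ≠ [] := fun h => by rw [h] at this; simp at this
      cases hEB : (pyB_holes lock).isEmpty
      · rfl
      · exact absurd (List.isEmpty_iff.1 hEB) hne2
    rcases hcase with hnohole | ⟨hkne, hsq⟩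
    · exfalso
      rcases List.exists_mem_of_ne_nil _ hhe with ⟨q, hq⟩
      rcases (mem_pyA_holes lock q).1 hq with ⟨a, b, ha, hb, -, hz⟩
      exact hnohole a ha b hb hz
    · rw [if_neg (by simpa using hhe), if_neg (by rw [hB]; exact Bool.false_ne_true)]
      have hh0 : (pyB_holeScan lock).headD (0, 0) ∈ pyA_holes lock := by
        rw [pyB_holeScan_eq]
        rcases hlist : pyA_holes lock with _ | ⟨q, t⟩
        · exact absurd hlist hhe
        · simp
      exact loop_eq lock hrow _ hh0 key.length (by cases key <;> simp_all) 4 key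
        (pyB_cells key) rfl hsq (mem_pyB_cells key key.length rfl hsq)
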